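-- pv_equiv track=rewrite | github.com/prachidave13/MLOA | EXP3/matrix-operation_minimum and maximum-cost-paths.py | max_nPr_pair
-- ===== SOURCE A (Python) =====
-- from itertools import combinations
--
-- def max_nPr_pair(arr):
--     n = len(arr)
--     max_nPr = -1
--     result = ()
--
--     for i, j in combinations(range(n), 2):
--         nPr = arr[i] * arr[j]
--         if nPr > max_nPr:
--             max_nPr = nPr
--             result = (arr[i], arr[j])
--
--     return result
-- ===== SOURCE B (Python) =====
-- def max_nPr_pair(arr):
--     n = len(arr)
--     if n < 2:
--         return ()
--     # one pass: track the two largest (t1 >= t2) and two smallest (b1 <= b2) elements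
--     t1, t2 = (arr[0], arr[1]) if arr[0] >= arr[1] else (arr[1], arr[0])
--     b1, b2 = t2, t1
--     for v in arr[2:]:
--         if v >= t1:
--             t1, t2 = v, t1
--         elif v > t2:
--             t2 = v
--         if v <= b1:
--             b1, b2 = v, b1
--         elif v < b2:
--             b2 = v
--     # the maximum pair product comes from the two largest or the two smallest
--     M = max(t1 * t2, b1 * b2)
--     # positions of each value, in increasing order
--     pos = {}
--     for k, v in enumerate(arr):
--         pos.setdefault(v, []).append(k)
--     # first pair (i, j), i < j, with arr[i] * arr[j] == M
--     for i in range(n - 1):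
--         v = arr[i]
--         if v == 0:
--             if M == 0:
--                 return (0, arr[i + 1])
--             continue
--         q, r = divmod(M, v)
--         if r:
--             continue
--         for j in pos.get(q, ()):
--             if j > i:
--                 return (v, arr[j])
--     return ()
-- ===== Notes on version B (the rewrite author's own statement) =====
-- stated objective: faster
-- what changed: A scans all O(n^2) index pairs; B finds the maximal pair product in one pass by tracking the two largest and two smallest elements, then locates the first (lexicographic) pair attaining it via a value-to-indices dictionary and divisibility.
-- intended difference: On two-element arrays whose product is negative (exactly the arrays where every pair product falls below A's initial sentinel of -1) A returns an empty result instead of the only pair; B returns that pair, the maximal-product pair the function is meant to find. — e.g. on max_nPr_pair([1, -1]): A returns [], B returns [1, -1]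
import Mathlib
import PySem

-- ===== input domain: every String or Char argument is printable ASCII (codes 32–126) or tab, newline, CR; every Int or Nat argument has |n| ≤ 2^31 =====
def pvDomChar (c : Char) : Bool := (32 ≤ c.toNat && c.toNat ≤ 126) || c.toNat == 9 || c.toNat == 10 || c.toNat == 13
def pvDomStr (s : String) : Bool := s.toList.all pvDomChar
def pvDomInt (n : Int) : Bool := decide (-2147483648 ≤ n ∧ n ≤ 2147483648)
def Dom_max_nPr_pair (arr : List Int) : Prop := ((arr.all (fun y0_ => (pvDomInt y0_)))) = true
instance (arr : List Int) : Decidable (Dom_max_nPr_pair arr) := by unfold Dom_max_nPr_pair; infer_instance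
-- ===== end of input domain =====

-- B replaces A's scan over all index pairs by one pass keeping the two largest and two smallest
-- elements (whose products give the maximal pair product), plus a value→indices dictionary used
-- to locate the first pair attaining it (objective: faster); on two-element arrays with negative
-- product B returns the pair where A returns an empty result (stated as D_ below).

-- ===== PORT A =====
-- A's loop body: update (max_nPr, result) with the pair p = (i, j)
def aStep (arr : List Int) (s : Int × List Int) (p : Nat × Nat) : Int × List Int :=
  let nPr := arr.getD p.1 0 * arr.getD p.2 0
  if s.1 < nPr then (nPr, [arr.getD p.1 0, arr.getD p.2 0]) else s

def max_nPr_pair (arr : List Int) : List Int :=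
  let n := arr.length
  -- combinations(range(n), 2) in lexicographic order, then A's loop as a fold
  (((List.range n).flatMap (fun i => ((List.range n).drop (i + 1)).map (fun j => (i, j)))).foldl
    (aStep arr) (-1, [])).2

-- ===== PORT B =====
-- one step of B's first pass: s = (t1, t2, b1, b2), the two largest / two smallest so far
def bTop (s : Int × Int × Int × Int) (v : Int) : Int × Int × Int × Int :=
  let t := if s.1 ≤ v then (v, s.1) else if s.2.1 < v then (s.1, v) else (s.1, s.2.1)
  let b := if v ≤ s.2.2.1 then (v, s.2.2.1) else if v < s.2.2.2 then (s.2.2.1, v) else (s.2.2.1, s.2.2.2)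
  (t.1, t.2, b.1, b.2)

-- B's dictionary: value -> list of its indices, in increasing order
def bBuild (arr : List Int) : PySem.Dict Int (List Nat) :=
  (List.range arr.length).foldl (fun d k => d.modify (arr.getD k 0) [] (fun l => l ++ [k])) PySem.Dict.empty

-- B's second loop: first i (then first j > i) with arr[i] * arr[j] = M
def bFind (arr : List Int) (idx : PySem.Dict Int (List Nat)) (M : Int) : List Nat → List Int
  | [] => []
  | i :: is =>
    let v := arr.getD i 0
    if v = 0 then
      if M = 0 then [0, arr.getD (i + 1) 0] else bFind arr idx M is
    else if PySem.Int.mod M v ≠ 0 then bFind arr idx M is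
    else
      match (idx.getD (PySem.Int.floordiv M v) []).find? (fun j => decide (i < j)) with
      | some j => [v, arr.getD j 0]
      | none => bFind arr idx M is

def max_nPr_pair_alt (arr : List Int) : List Int :=
  match arr with
  | [] => []
  | [_] => []
  | a :: b :: rest =>
    let s0 := if b ≤ a then (a, b) else (b, a)
    let st := rest.foldl bTop (s0.1, s0.2, s0.2, s0.1)
    let M := max (st.1 * st.2.1) (st.2.2.1 * st.2.2.2)
    bFind arr (bBuild arr) M (List.range (arr.length - 1))

-- ===== PRECONDITION & SPEC =====
-- On two-element arrays with negative product (exactly the arrays all of whose pair products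
-- fall below A's initial max_nPr sentinel) A returns an empty result instead of the only pair; B returns that
-- pair, the maximal-product pair the function is meant to find.
def D_max_nPr_pair (arr : List Int) : Prop :=
  arr.length = 2 ∧ arr.getD 0 0 * arr.getD 1 0 ≤ -1
instance (arr : List Int) : Decidable (D_max_nPr_pair arr) := by unfold D_max_nPr_pair; infer_instance

def Spec_max_nPr_pair (arr : List Int) (out : List Int) : Prop :=
  ¬ D_max_nPr_pair arr → out = max_nPr_pair_alt arr
instance (arr : List Int) (out : List Int) : Decidable (Spec_max_nPr_pair arr out) := by unfold Spec_max_nPr_pair; infer_instance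

def pvDiffWitness_max_nPr_pair : List Int := [1, -1]
def pvDiffWitnessOut_max_nPr_pair : (List Int) × (List Int) := ([], [1, -1])

-- ===== CLAIM (what is proved, stated in full; the proofs are below) =====
def Claim_unchanged_max_nPr_pair : Prop := ∀ (arr : List Int), Dom_max_nPr_pair arr → Spec_max_nPr_pair arr (max_nPr_pair arr)
def Claim_changed_max_nPr_pair : Prop := Dom_max_nPr_pair (pvDiffWitness_max_nPr_pair) ∧ D_max_nPr_pair (pvDiffWitness_max_nPr_pair) ∧ max_nPr_pair (pvDiffWitness_max_nPr_pair) = pvDiffWitnessOut_max_nPr_pair.1 ∧ max_nPr_pair_alt (pvDiffWitness_max_nPr_pair) = pvDiffWitnessOut_max_nPr_pair.2 ∧ pvDiffWitnessOut_max_nPr_pair.1 ≠ pvDiffWitnessOut_max_nPr_pair.2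
def Claim_exact_max_nPr_pair : Prop := ∀ (arr : List Int), Dom_max_nPr_pair arr → D_max_nPr_pair arr → max_nPr_pair arr ≠ max_nPr_pair_alt arr

-- ===== LEMMAS AND PROOFS =====

-- the list of index pairs A iterates over, and the product / result of a pair
def pPairs (n : Nat) : List (Nat × Nat) :=
  (List.range n).flatMap (fun i => ((List.range n).drop (i + 1)).map (fun j => (i, j)))

def pv (arr : List Int) (p : Nat × Nat) : Int := arr.getD p.1 0 * arr.getD p.2 0

def pg (arr : List Int) (p : Nat × Nat) : List Int := [arr.getD p.1 0, arr.getD p.2 0]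

def runMax (arr : List Int) (m : Int) (xs : List (Nat × Nat)) : Int :=
  xs.foldl (fun a p => max a (pv arr p)) m

lemma le_runMax (arr : List Int) (m : Int) (xs : List (Nat × Nat)) : m ≤ runMax arr m xs := by
  induction xs generalizing m with
  | nil => simp [runMax]
  | cons p xs ih => exact le_trans (le_max_left m (pv arr p)) (ih (max m (pv arr p)))

lemma pv_le_runMax (arr : List Int) (m : Int) (xs : List (Nat × Nat)) (p : Nat × Nat)
    (hp : p ∈ xs) : pv arr p ≤ runMax arr m xs := by
  induction xs generalizing m with
  | nil => simp at hp
  | cons q xs ih =>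
    rcases List.mem_cons.1 hp with h | h
    · subst h
      exact le_trans (le_max_right m (pv arr p)) (le_runMax arr _ xs)
    · exact ih (max m (pv arr q)) h

lemma runMax_le (arr : List Int) (m c : Int) (xs : List (Nat × Nat)) (hm : m ≤ c)
    (hxs : ∀ p ∈ xs, pv arr p ≤ c) : runMax arr m xs ≤ c := by
  induction xs generalizing m with
  | nil => simpa [runMax] using hm
  | cons q xs ih =>
    exact ih (max m (pv arr q)) (max_le hm (hxs q (List.mem_cons_self)))
      (fun p hp => hxs p (List.mem_cons_of_mem q hp))

lemma runMax_find_some (arr : List Int) (m : Int) (xs : List (Nat × Nat))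
    (h : m < runMax arr m xs) :
    ∃ p, xs.find? (fun p => pv arr p == runMax arr m xs) = some p := by
  induction xs generalizing m with
  | nil => simp [runMax] at h
  | cons q xs ih =>
    by_cases hq : pv arr q = runMax arr m (q :: xs)
    · exact ⟨q, List.find?_cons_of_pos (by simpa using hq)⟩
    · have h1 : runMax arr m (q :: xs) = runMax arr (max m (pv arr q)) xs := rfl
      rcases (le_runMax arr (max m (pv arr q)) xs).lt_or_eq with h2 | h2
      · obtain ⟨p, hp⟩ := ih (max m (pv arr q)) h2
        refine ⟨p, ?_⟩
        rw [List.find?_cons_of_neg (by simpa using hq), h1]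
        exact hp
      · exfalso
        rw [h1, ← h2] at h hq
        rcases max_cases m (pv arr q) with ⟨he, _⟩ | ⟨he, _⟩ <;> omega

-- characterisation of A's fold: the final max, and the first pair attaining it (if it beats m)
lemma foldA_char (arr : List Int) (xs : List (Nat × Nat)) (m : Int) (r : List Int) :
    xs.foldl (aStep arr) (m, r) =
      (runMax arr m xs,
        ((xs.find? (fun p => pv arr p == runMax arr m xs)).map
          (fun p => if m < pv arr p then pg arr p else r)).getD r) := by
  induction xs generalizing m r with
  | nil => simp [runMax]
  | cons q xs ih =>
    have h1 : runMax arr m (q :: xs) = runMax arr (max m (pv arr q)) xs := rfl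
    have hqle : pv arr q ≤ runMax arr m (q :: xs) := pv_le_runMax arr m _ q (List.mem_cons_self)
    rw [List.foldl_cons]
    by_cases hq : m < pv arr q
    · have hstep : aStep arr (m, r) q = (pv arr q, pg arr q) := by
        show (if m < pv arr q then (pv arr q, pg arr q) else (m, r)) = _
        rw [if_pos hq]
      have hmax : max m (pv arr q) = pv arr q := max_eq_right (le_of_lt hq)
      have hMeq : runMax arr (pv arr q) xs = runMax arr m (q :: xs) := by rw [h1, hmax]
      rw [hstep, ih, hMeq]
      simp only [Prod.mk.injEq]
      refine ⟨trivial, ?_⟩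
      by_cases hqM : pv arr q = runMax arr m (q :: xs)
      · rw [List.find?_cons_of_pos (by simpa using hqM)]
        rw [Option.map_some, Option.getD_some, if_pos hq]
        cases hfind : xs.find? (fun p => pv arr p == runMax arr m (q :: xs)) with
        | none => rw [Option.map_none, Option.getD_none]
        | some p =>
          have hpv : pv arr p = runMax arr m (q :: xs) := by simpa using List.find?_some hfind
          have hc : ¬ pv arr q < pv arr p := by rw [hpv, ← hqM]; exact lt_irrefl _
          rw [Option.map_some, Option.getD_some, if_neg hc]
      · have hlt : pv arr q < runMax arr m (q :: xs) := lt_of_le_of_ne hqle hqM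
        rw [List.find?_cons_of_neg (by simpa using hqM)]
        obtain ⟨p, hp⟩ := runMax_find_some arr (pv arr q) xs (by rw [hMeq]; exact hlt)
        rw [hMeq] at hp
        rw [hp]
        simp only [Option.map_some, Option.getD_some]
        have hpv : pv arr p = runMax arr m (q :: xs) := by simpa using List.find?_some hp
        have hc1 : pv arr q < pv arr p := by rw [hpv]; exact hlt
        have hc2 : m < pv arr p := by rw [hpv]; exact lt_trans hq hlt
        rw [if_pos hc1, if_pos hc2]
    · have hstep : aStep arr (m, r) q = (m, r) := by
        show (if m < pv arr q then (pv arr q, pg arr q) else (m, r)) = _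
        rw [if_neg hq]
      have hmax : max m (pv arr q) = m := max_eq_left (not_lt.1 hq)
      have hMeq : runMax arr m xs = runMax arr m (q :: xs) := by rw [h1, hmax]
      rw [hstep, ih, hMeq]
      simp only [Prod.mk.injEq]
      refine ⟨trivial, ?_⟩
      by_cases hqM : pv arr q = runMax arr m (q :: xs)
      · rw [List.find?_cons_of_pos (by simpa using hqM)]
        rw [Option.map_some, Option.getD_some, if_neg hq]
        cases hfind : xs.find? (fun p => pv arr p == runMax arr m (q :: xs)) with
        | none => rw [Option.map_none, Option.getD_none]
        | some p =>
          have hpv : pv arr p = runMax arr m (q :: xs) := by simpa using List.find?_some hfind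
          have hc : ¬ m < pv arr p := by rw [hpv, ← hqM]; exact hq
          rw [Option.map_some, Option.getD_some, if_neg hc]
      · rw [List.find?_cons_of_neg (by simpa using hqM)]

-- B's first-pass invariants: (t1,t2) are the two largest, (b1,b2) the two smallest of l
def TInv (l : List Int) (t1 t2 : Int) : Prop :=
  ∃ m : Multiset Int, (l : Multiset Int) = t1 ::ₘ t2 ::ₘ m ∧ t2 ≤ t1 ∧ ∀ x ∈ m, x ≤ t2

def BoInv (l : List Int) (b1 b2 : Int) : Prop :=
  ∃ m : Multiset Int, (l : Multiset Int) = b1 ::ₘ b2 ::ₘ m ∧ b1 ≤ b2 ∧ ∀ x ∈ m, b2 ≤ x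

def PairInv (l : List Int) (s : Int × Int × Int × Int) : Prop :=
  TInv l s.1 s.2.1 ∧ BoInv l s.2.2.1 s.2.2.2

lemma coe_append_singleton (l : List Int) (v : Int) :
    ((l ++ [v] : List Int) : Multiset Int) = v ::ₘ (l : Multiset Int) := by
  calc ((l ++ [v] : List Int) : Multiset Int) = ↑l + ↑([v] : List Int) := (Multiset.coe_add l [v]).symm
    _ = ↑([v] : List Int) + ↑l := add_comm _ _
    _ = ({v} : Multiset Int) + ↑l := by rw [Multiset.coe_singleton]
    _ = v ::ₘ (l : Multiset Int) := Multiset.singleton_add v _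

lemma tinv_step (l : List Int) (t1 t2 v : Int) (h : TInv l t1 t2) :
    TInv (l ++ [v]) (if t1 ≤ v then v else t1) (if t1 ≤ v then t1 else if t2 < v then v else t2) := by
  obtain ⟨m, hm, h12, hall⟩ := h
  by_cases h1 : t1 ≤ v
  · refine ⟨t2 ::ₘ m, ?_, ?_, ?_⟩
    · simp only [if_pos h1]
      rw [coe_append_singleton, hm]
    · simp only [if_pos h1]; exact h1
    · intro x hx
      simp only [if_pos h1]
      rcases Multiset.mem_cons.1 hx with h | h
      · omega
      · exact le_trans (hall x h) h12
  · by_cases h2 : t2 < v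
    · refine ⟨t2 ::ₘ m, ?_, ?_, ?_⟩
      · simp only [if_neg h1, if_pos h2]
        rw [coe_append_singleton, hm, Multiset.cons_swap v t1]
      · simp only [if_neg h1, if_pos h2]; omega
      · intro x hx
        simp only [if_neg h1, if_pos h2]
        rcases Multiset.mem_cons.1 hx with h | h
        · omega
        · exact le_of_lt (lt_of_le_of_lt (hall x h) h2)
    · refine ⟨v ::ₘ m, ?_, ?_, ?_⟩
      · simp only [if_neg h1, if_neg h2]
        rw [coe_append_singleton, hm, Multiset.cons_swap v t1, Multiset.cons_swap v t2]
      · simp only [if_neg h1, if_neg h2]; exact h12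
      · intro x hx
        simp only [if_neg h1, if_neg h2]
        rcases Multiset.mem_cons.1 hx with h | h
        · omega
        · exact hall x h

lemma binv_step (l : List Int) (b1 b2 v : Int) (h : BoInv l b1 b2) :
    BoInv (l ++ [v]) (if v ≤ b1 then v else b1) (if v ≤ b1 then b1 else if v < b2 then v else b2) := by
  obtain ⟨m, hm, h12, hall⟩ := h
  by_cases h1 : v ≤ b1
  · refine ⟨b2 ::ₘ m, ?_, ?_, ?_⟩
    · simp only [if_pos h1]
      rw [coe_append_singleton, hm]
    · simp only [if_pos h1]; exact h1
    · intro x hx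
      simp only [if_pos h1]
      rcases Multiset.mem_cons.1 hx with h | h
      · omega
      · exact le_trans h12 (hall x h)
  · by_cases h2 : v < b2
    · refine ⟨b2 ::ₘ m, ?_, ?_, ?_⟩
      · simp only [if_neg h1, if_pos h2]
        rw [coe_append_singleton, hm, Multiset.cons_swap v b1]
      · simp only [if_neg h1, if_pos h2]; omega
      · intro x hx
        simp only [if_neg h1, if_pos h2]
        rcases Multiset.mem_cons.1 hx with h | h
        · omega
        · exact le_of_lt (lt_of_lt_of_le h2 (hall x h))
    · refine ⟨v ::ₘ m, ?_, ?_, ?_⟩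
      · simp only [if_neg h1, if_neg h2]
        rw [coe_append_singleton, hm, Multiset.cons_swap v b1, Multiset.cons_swap v b2]
      · simp only [if_neg h1, if_neg h2]; exact h12
      · intro x hx
        simp only [if_neg h1, if_neg h2]
        rcases Multiset.mem_cons.1 hx with h | h
        · omega
        · exact hall x h

lemma bTop_eq (t1 t2 b1 b2 v : Int) :
    bTop (t1, t2, b1, b2) v =
      (if t1 ≤ v then v else t1, (if t1 ≤ v then t1 else if t2 < v then v else t2),
       (if v ≤ b1 then v else b1), (if v ≤ b1 then b1 else if v < b2 then v else b2)) := by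
  simp only [bTop]
  split_ifs <;> rfl

lemma pairinv_step (l : List Int) (s : Int × Int × Int × Int) (v : Int) (h : PairInv l s) :
    PairInv (l ++ [v]) (bTop s v) := by
  obtain ⟨t1, t2, b1, b2⟩ := s
  obtain ⟨ht, hb⟩ := h
  rw [bTop_eq]
  exact ⟨tinv_step l t1 t2 v ht, binv_step l b1 b2 v hb⟩

lemma pairinv_fold (rest : List Int) (l : List Int) (s : Int × Int × Int × Int) (h : PairInv l s) :
    PairInv (l ++ rest) (rest.foldl bTop s) := by
  induction rest generalizing l s with
  | nil => simpa using h
  | cons v rest ih =>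
    have := ih (l ++ [v]) (bTop s v) (pairinv_step l s v h)
    simpa using this

lemma pairinv_init (a b : Int) :
    PairInv [a, b] ((if b ≤ a then ((a, b) : Int × Int) else (b, a)).1,
      (if b ≤ a then ((a, b) : Int × Int) else (b, a)).2,
      (if b ≤ a then ((a, b) : Int × Int) else (b, a)).2,
      (if b ≤ a then ((a, b) : Int × Int) else (b, a)).1) := by
  by_cases h : b ≤ a
  · simp only [if_pos h]
    exact ⟨⟨0, rfl, h, by simp⟩, ⟨0, by rw [← Multiset.cons_swap]; rfl, h, by simp⟩⟩
  · simp only [if_neg h]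
    exact ⟨⟨0, by rw [← Multiset.cons_swap]; rfl, le_of_not_ge h, by simp⟩,
           ⟨0, rfl, le_of_not_ge h, by simp⟩⟩

-- pure arithmetic: the bound, away from the degenerate case t2 < 0 < b2
lemma arith_bound (t1 t2 b1 b2 x y : Int) (hx1 : x ≤ t1) (hy1 : y ≤ t1) (hxb : b1 ≤ x)
    (hyb : b1 ≤ y) (ht : t2 ≤ t1) (hb : b1 ≤ b2) (h2 : x ≤ t2 ∨ y ≤ t2)
    (hb2 : b2 ≤ x ∨ b2 ≤ y) (hs : 0 ≤ t2 ∨ b2 ≤ 0) :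
    x * y ≤ max (t1 * t2) (b1 * b2) := by
  rcases le_total 0 x with hx | hx <;> rcases le_total 0 y with hy | hy
  · refine le_trans ?_ (le_max_left _ _)
    rcases h2 with h2 | h2
    · nlinarith
    · nlinarith
  · rcases hs with hs | hs
    · refine le_trans ?_ (le_max_left _ _)
      nlinarith
    · refine le_trans ?_ (le_max_right _ _)
      nlinarith
  · rcases hs with hs | hs
    · refine le_trans ?_ (le_max_left _ _)
      nlinarith
    · refine le_trans ?_ (le_max_right _ _)
      nlinarith
  · refine le_trans ?_ (le_max_right _ _)
    rcases hb2 with hb2 | hb2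
    · nlinarith
    · nlinarith

lemma pair_eq_of_two (x y t1 t2 : Int) (h : (x ::ₘ y ::ₘ 0 : Multiset Int) = t1 ::ₘ t2 ::ₘ 0) :
    x * y = t1 * t2 := by
  rcases Multiset.cons_eq_cons.1 h with ⟨hx, hy⟩ | ⟨hne, cs, h1, h2⟩
  · have hy' : y = t2 := by
      rwa [Multiset.cons_zero, Multiset.cons_zero, Multiset.singleton_inj] at hy
    rw [hx, hy']
  · have hcs : cs = 0 := by
      have hc := congrArg Multiset.card h1
      simp only [Multiset.card_cons, Multiset.card_zero] at hc
      have : Multiset.card cs = 0 := by omega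
      exact Multiset.card_eq_zero.1 this
    subst hcs
    have hy1 : y = t1 := by
      rwa [Multiset.cons_zero, Multiset.cons_zero, Multiset.singleton_inj] at h1
    have hx2 : t2 = x := by
      rwa [Multiset.cons_zero, Multiset.cons_zero, Multiset.singleton_inj] at h2
    rw [hy1, ← hx2]; ring

-- any 2-element sub-multiset has product bounded by max(t1*t2, b1*b2)
lemma pair_bound (l : List Int) (s : Int × Int × Int × Int) (h : PairInv l s)
    (x y : Int) (r : Multiset Int) (hxy : (l : Multiset Int) = x ::ₘ y ::ₘ r) :
    x * y ≤ max (s.1 * s.2.1) (s.2.2.1 * s.2.2.2) := by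
  obtain ⟨t1, t2, b1, b2⟩ := s
  obtain ⟨⟨mt, hmt, ht12, hmtall⟩, ⟨mb, hmb, hb12, hmball⟩⟩ := h
  dsimp only at hmt hmb ht12 hmtall hb12 hmball ⊢
  have hmemt : ∀ z ∈ (l : Multiset Int), z ≤ t1 := by
    intro z hz
    rw [hmt] at hz
    rcases Multiset.mem_cons.1 hz with h | hz
    · omega
    · rcases Multiset.mem_cons.1 hz with h | hz
      · omega
      · have := hmtall z hz; omega
  have hmemb : ∀ z ∈ (l : Multiset Int), b1 ≤ z := by
    intro z hz
    rw [hmb] at hz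
    rcases Multiset.mem_cons.1 hz with h | hz
    · omega
    · rcases Multiset.mem_cons.1 hz with h | hz
      · omega
      · have := hmball z hz; omega
  have hxl : x ∈ (l : Multiset Int) := by rw [hxy]; exact Multiset.mem_cons_self _ _
  have hyl : y ∈ (l : Multiset Int) := by
    rw [hxy]; exact Multiset.mem_cons_of_mem (Multiset.mem_cons_self _ _)
  have h2 : x ≤ t2 ∨ y ≤ t2 := by
    by_contra hc
    push_neg at hc
    obtain ⟨hcx, hcy⟩ := hc
    have hle : Multiset.countP (fun z => t2 < z) (l : Multiset Int) ≤ 1 := by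
      rw [hmt, Multiset.countP_cons, Multiset.countP_cons]
      have hz : Multiset.countP (fun z => t2 < z) mt = 0 :=
        Multiset.countP_eq_zero.2 (fun a ha => by have := hmtall a ha; omega)
      rw [hz]
      split_ifs <;> omega
    have hge : 2 ≤ Multiset.countP (fun z => t2 < z) (l : Multiset Int) := by
      rw [hxy, Multiset.countP_cons, Multiset.countP_cons]
      split_ifs <;> omega
    omega
  have hb2 : b2 ≤ x ∨ b2 ≤ y := by
    by_contra hc
    push_neg at hc
    obtain ⟨hcx, hcy⟩ := hc
    have hle : Multiset.countP (fun z => z < b2) (l : Multiset Int) ≤ 1 := by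
      rw [hmb, Multiset.countP_cons, Multiset.countP_cons]
      have hz : Multiset.countP (fun z => z < b2) mb = 0 :=
        Multiset.countP_eq_zero.2 (fun a ha => by have := hmball a ha; omega)
      rw [hz]
      split_ifs <;> omega
    have hge : 2 ≤ Multiset.countP (fun z => z < b2) (l : Multiset Int) := by
      rw [hxy, Multiset.countP_cons, Multiset.countP_cons]
      split_ifs <;> omega
    omega
  by_cases hdeg : t2 < 0 ∧ 0 < b2
  · obtain ⟨hdt, hdb⟩ := hdeg
    have hmt0 : mt = 0 := by
      have hle : Multiset.countP (fun z => z < 0) (l : Multiset Int) ≤ 1 := by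
        rw [hmb, Multiset.countP_cons, Multiset.countP_cons]
        have hz : Multiset.countP (fun z => z < 0) mb = 0 :=
          Multiset.countP_eq_zero.2 (fun a ha => by have := hmball a ha; omega)
        rw [hz]
        split_ifs <;> omega
      have hge : 1 + Multiset.card mt ≤ Multiset.countP (fun z => z < 0) (l : Multiset Int) := by
        rw [hmt, Multiset.countP_cons, Multiset.countP_cons]
        have hzc : Multiset.countP (fun z => z < 0) mt = Multiset.card mt :=
          Multiset.countP_eq_card.2 (fun a ha => by have := hmtall a ha; omega)
        rw [hzc]
        split_ifs <;> omega
      have : Multiset.card mt = 0 := by omega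
      exact Multiset.card_eq_zero.1 this
    subst hmt0
    have hr0 : r = 0 := by
      have hc1 := congrArg Multiset.card hmt
      have hc2 := congrArg Multiset.card hxy
      simp only [Multiset.card_cons, Multiset.card_zero] at hc1 hc2
      have : Multiset.card r = 0 := by omega
      exact Multiset.card_eq_zero.1 this
    subst hr0
    have hpe := pair_eq_of_two x y t1 t2 (by rw [← hxy, hmt])
    rw [hpe]
    exact le_max_left _ _
  · have hs : 0 ≤ t2 ∨ b2 ≤ 0 := by
      rcases not_and_or.1 hdeg with h | h
      · left; omega
      · right; omega
    exact arith_bound t1 t2 b1 b2 x y (hmemt x hxl) (hmemt y hyl) (hmemb x hxl) (hmemb y hyl)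
      ht12 hb12 h2 hb2 hs

-- a 2-element sub-multiset is realised by an index pair i < j
lemma exists_pair_of_cons_cons (l : List Int) (x y : Int) (r : Multiset Int)
    (h : (l : Multiset Int) = x ::ₘ y ::ₘ r) :
    ∃ i j : Nat, i < j ∧ j < l.length ∧ l.getD i 0 * l.getD j 0 = x * y := by
  induction l generalizing x y r with
  | nil =>
    exfalso
    have := congrArg Multiset.card h
    simp at this
  | cons z l ih =>
    have hcz : ((z :: l : List Int) : Multiset Int) = z ::ₘ (l : Multiset Int) :=
      (Multiset.cons_coe z l).symm
    rw [hcz] at h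
    have hz : z = x ∨ z = y ∨ z ∈ r := by
      have hmem : z ∈ (x ::ₘ y ::ₘ r : Multiset Int) := h ▸ Multiset.mem_cons_self z _
      simpa [Multiset.mem_cons] using hmem
    rcases hz with hzx | hzy | hz
    · rw [hzx] at h
      have hl : (l : Multiset Int) = y ::ₘ r := (Multiset.cons_inj_right x).1 h
      have hy : y ∈ l := by
        rw [← Multiset.mem_coe, hl]; exact Multiset.mem_cons_self y r
      obtain ⟨j, hj, hjy⟩ := List.mem_iff_getElem.1 hy
      refine ⟨0, j + 1, by omega, by simp [List.length_cons]; omega, ?_⟩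
      rw [List.getD_cons_zero, List.getD_cons_succ, List.getD_eq_getElem l 0 hj, hjy, hzx]
    · rw [hzy] at h
      rw [Multiset.cons_swap x y] at h
      have hl : (l : Multiset Int) = x ::ₘ r := (Multiset.cons_inj_right y).1 h
      have hx : x ∈ l := by
        rw [← Multiset.mem_coe, hl]; exact Multiset.mem_cons_self x r
      obtain ⟨j, hj, hjx⟩ := List.mem_iff_getElem.1 hx
      refine ⟨0, j + 1, by omega, by simp [List.length_cons]; omega, ?_⟩
      rw [List.getD_cons_zero, List.getD_cons_succ, List.getD_eq_getElem l 0 hj, hjx, hzy]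
      ring
    · obtain ⟨r', rfl⟩ := Multiset.exists_cons_of_mem hz
      have h' : (z ::ₘ (l : Multiset Int)) = z ::ₘ x ::ₘ y ::ₘ r' := by
        rw [h, Multiset.cons_swap y z, Multiset.cons_swap x z]
      have hl : (l : Multiset Int) = x ::ₘ y ::ₘ r' := (Multiset.cons_inj_right z).1 h'
      obtain ⟨i, j, hij, hjl, hprod⟩ := ih x y r' hl
      refine ⟨i + 1, j + 1, by omega, by simp [List.length_cons]; omega, ?_⟩
      rw [List.getD_cons_succ, List.getD_cons_succ]
      exact hprod

-- the dictionary built by B maps q to the increasing list of indices holding q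
lemma build_aux (arr : List Int) (ks : List Nat) (d : PySem.Dict Int (List Nat)) (q : Int) :
    (ks.foldl (fun d k => d.modify (arr.getD k 0) [] (fun l => l ++ [k])) d).getD q [] =
      d.getD q [] ++ ks.filter (fun k => arr.getD k 0 == q) := by
  induction ks generalizing d with
  | nil => simp
  | cons k ks ih =>
    rw [List.foldl_cons, ih]
    by_cases hk : arr.getD k 0 = q
    · rw [List.filter_cons_of_pos (by simpa using hk), PySem.Dict.getD_modify, if_pos hk.symm, hk]
      simp
    · rw [List.filter_cons_of_neg (by simpa using hk), PySem.Dict.getD_modify,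
        if_neg (fun hh => hk hh.symm)]

lemma bBuild_getD (arr : List Int) (q : Int) :
    (bBuild arr).getD q [] = (List.range arr.length).filter (fun k => arr.getD k 0 == q) := by
  unfold bBuild
  rw [build_aux]
  simp

lemma find?_all_true (P' P : Nat → Bool) (l : List Nat) (h : ∀ x ∈ l, P' x = true) :
    (l.filter P).find? P' = l.find? P := by
  induction l with
  | nil => rfl
  | cons x l ih =>
    by_cases hP : P x = true
    · rw [List.filter_cons_of_pos hP, List.find?_cons_of_pos (h x (List.mem_cons_self)),
        List.find?_cons_of_pos hP]
    · rw [List.filter_cons_of_neg (by simpa using hP), List.find?_cons_of_neg (by simpa using hP)]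
      exact ih (fun x hx => h x (List.mem_cons_of_mem _ hx))

lemma find?_ext {α : Type} (p q : α → Bool) (l : List α) (h : ∀ x, p x = q x) :
    l.find? p = l.find? q := by
  induction l with
  | nil => rfl
  | cons a l ih =>
    by_cases hp : p a = true
    · rw [List.find?_cons_of_pos hp, List.find?_cons_of_pos (by rw [← h a]; exact hp)]
    · rw [List.find?_cons_of_neg hp, List.find?_cons_of_neg (by rw [← h a]; exact hp), ih]

lemma mem_drop_range (n k j : Nat) : j ∈ (List.range n).drop k ↔ k ≤ j ∧ j < n := by
  constructor
  · intro hj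
    obtain ⟨a, ha, hja⟩ := List.mem_iff_getElem.1 hj
    rw [List.getElem_drop] at hja
    have ha' : a < n - k := by simpa [List.length_drop] using ha
    rw [List.getElem_range] at hja
    omega
  · rintro ⟨h1, h2⟩
    have hlen : j - k < ((List.range n).drop k).length := by
      simp [List.length_drop]; omega
    rw [List.mem_iff_getElem]
    refine ⟨j - k, hlen, ?_⟩
    rw [List.getElem_drop, List.getElem_range]
    omega

lemma mem_pPairs (n : Nat) (p : Nat × Nat) : p ∈ pPairs n ↔ p.1 < p.2 ∧ p.2 < n := by
  simp only [pPairs, List.mem_flatMap, List.mem_map, List.mem_range]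
  constructor
  · rintro ⟨i, hi, j, hj, rfl⟩
    obtain ⟨h1, h2⟩ := (mem_drop_range _ _ _).1 hj
    exact ⟨by omega, h2⟩
  · rintro ⟨h1, h2⟩
    exact ⟨p.1, by omega, p.2, (mem_drop_range _ _ _).2 ⟨by omega, h2⟩, rfl⟩

lemma submultiset_of_pair (l : List Int) (i j : Nat) (hij : i < j) (hj : j < l.length) :
    ∃ r : Multiset Int, (l : Multiset Int) = l.getD i 0 ::ₘ l.getD j 0 ::ₘ r := by
  have hi : i < l.length := lt_trans hij hj
  have hdropi : l.drop i = l.getD i 0 :: l.drop (i + 1) := by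
    rw [List.getD_eq_getElem l 0 hi]
    exact List.drop_eq_getElem_cons hi
  have hjmem : l.getD j 0 ∈ l.drop (i + 1) := by
    have h1 : (l.drop (i + 1))[j - (i + 1)]? = l[j]? := by
      rw [List.getElem?_drop]
      congr 1
      omega
    have h2 : l[j]? = some (l.getD j 0) := by
      rw [List.getD_eq_getElem l 0 hj, List.getElem?_eq_getElem hj]
    rw [h2] at h1
    exact List.mem_of_getElem? h1
  obtain ⟨r', hr'⟩ := Multiset.exists_cons_of_mem ((Multiset.mem_coe).2 hjmem)
  refine ⟨r' + ↑(l.take i), ?_⟩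
  calc (l : Multiset Int) = ↑(l.take i ++ l.drop i) := by rw [List.take_append_drop]
    _ = ↑(l.take i) + ↑(l.drop i) := (Multiset.coe_add _ _).symm
    _ = ↑(l.take i) + ↑(l.getD i 0 :: l.drop (i + 1)) := by rw [hdropi]
    _ = ↑(l.take i) + (l.getD i 0 ::ₘ ↑(l.drop (i + 1))) := by rw [Multiset.cons_coe]
    _ = ↑(l.take i) + (l.getD i 0 ::ₘ (l.getD j 0 ::ₘ r')) := by rw [hr']
    _ = (l.getD i 0 ::ₘ (l.getD j 0 ::ₘ r')) + ↑(l.take i) := add_comm _ _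
    _ = l.getD i 0 ::ₘ ((l.getD j 0 ::ₘ r') + ↑(l.take i)) := Multiset.cons_add _ _ _
    _ = l.getD i 0 ::ₘ l.getD j 0 ::ₘ (r' + ↑(l.take i)) := by rw [Multiset.cons_add]

-- B's scan over the dictionary entry = spec search over j > i
lemma find_gt_filter_range (n i : Nat) (P : Nat → Bool) :
    ((List.range n).filter P).find? (fun k => decide (i < k)) =
      ((List.range n).drop (i + 1)).find? P := by
  conv_lhs => rw [← List.take_append_drop (i + 1) (List.range n)]
  rw [List.filter_append, List.find?_append]
  have h1 : (((List.range n).take (i + 1)).filter P).find? (fun k => decide (i < k)) = none := by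
    rw [List.find?_eq_none]
    intro k hk
    have hk' : k ∈ (List.range n).take (i + 1) := List.mem_of_mem_filter hk
    rw [List.take_range] at hk'
    have hkn : k < min (i + 1) n := List.mem_range.1 hk'
    simp only [decide_eq_true_eq]
    omega
  rw [h1, Option.none_or]
  exact find?_all_true _ P _ (fun x hx => by
    have := (mem_drop_range n (i + 1) x).1 hx
    simp only [decide_eq_true_eq]
    omega)

-- B's outer loop = find? over A's pair list restricted to the given i's
lemma bFind_char (arr : List Int) (M : Int) (hM : 0 ≤ M) (il : List Nat)
    (hil : ∀ i ∈ il, i + 1 < arr.length) :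
    bFind arr (bBuild arr) M il =
      (((il.flatMap (fun i => (((List.range arr.length).drop (i + 1)).map (fun j => (i, j))))).find?
          (fun p => pv arr p == M)).map (pg arr)).getD [] := by
  induction il with
  | nil => rfl
  | cons i is ih =>
    have hi : i + 1 < arr.length := hil i (List.mem_cons_self)
    have hrec := ih (fun x hx => hil x (List.mem_cons_of_mem _ hx))
    have hunfold : bFind arr (bBuild arr) M (i :: is) =
        (if arr.getD i 0 = 0 then
          if M = 0 then [0, arr.getD (i + 1) 0] else bFind arr (bBuild arr) M is
        else if PySem.Int.mod M (arr.getD i 0) ≠ 0 then bFind arr (bBuild arr) M is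
        else
          match ((bBuild arr).getD (PySem.Int.floordiv M (arr.getD i 0)) []).find?
              (fun j => decide (i < j)) with
          | some j => [arr.getD i 0, arr.getD j 0]
          | none => bFind arr (bBuild arr) M is) := rfl
    rw [hunfold, List.flatMap_cons, List.find?_append]
    by_cases hv : arr.getD i 0 = 0
    · by_cases hM0 : M = 0
      · have hhead : (List.range arr.length).drop (i + 1) =
            (i + 1) :: (List.range arr.length).drop (i + 1 + 1) := by
          have h1 := List.drop_eq_getElem_cons (l := List.range arr.length) (i := i + 1)
            (by simpa using hi)
          rwa [List.getElem_range] at h1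
        have hPred : ((fun p => pv arr p == M) ((i, i + 1) : Nat × Nat)) = true := by
          show (arr.getD i 0 * arr.getD (i + 1) 0 == M) = true
          rw [hv, zero_mul, hM0]
          decide
        rw [if_pos hv, if_pos hM0, hhead, List.map_cons,
          List.find?_cons_of_pos (p := fun p => pv arr p == M) hPred,
          Option.some_or, Option.map_some, Option.getD_some]
        show [(0 : Int), arr.getD (i + 1) 0] = [arr.getD i 0, arr.getD (i + 1) 0]
        rw [hv]
      · have hnone : ((((List.range arr.length).drop (i + 1)).map (fun j => (i, j))).find?
            (fun p => pv arr p == M)) = none := by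
          rw [List.find?_eq_none]
          intro p hp
          obtain ⟨j, hj, rfl⟩ := List.mem_map.1 hp
          intro hcon
          have h0 : arr.getD i 0 * arr.getD j 0 = M := by simpa using hcon
          rw [hv, zero_mul] at h0
          exact hM0 h0.symm
        rw [if_pos hv, if_neg hM0, hnone, Option.none_or]
        exact hrec
    · by_cases hmod : PySem.Int.mod M (arr.getD i 0) = 0
      · have hvq : arr.getD i 0 * PySem.Int.floordiv M (arr.getD i 0) = M := by
          have h0 := PySem.Int.floordiv_mul_add_mod M (arr.getD i 0)
          rw [hmod] at h0
          rw [mul_comm]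
          omega
        have hdict : ((bBuild arr).getD (PySem.Int.floordiv M (arr.getD i 0)) []).find?
              (fun j => decide (i < j)) =
            ((List.range arr.length).drop (i + 1)).find?
              ((fun p => pv arr p == M) ∘ (fun j => ((i, j) : Nat × Nat))) := by
          rw [bBuild_getD, find_gt_filter_range]
          apply find?_ext
          intro k
          by_cases hk : arr.getD k 0 = PySem.Int.floordiv M (arr.getD i 0)
          · have hpvk : pv arr (i, k) = M := by
              show arr.getD i 0 * arr.getD k 0 = M
              rw [hk]; exact hvq
            show (arr.getD k 0 == PySem.Int.floordiv M (arr.getD i 0)) =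
              (pv arr (i, k) == M)
            rw [Bool.eq_iff_iff]
            simp only [beq_iff_eq]
            exact iff_of_true hk hpvk
          · have hpvk : ¬ pv arr (i, k) = M := by
              show ¬ arr.getD i 0 * arr.getD k 0 = M
              intro hEq
              exact hk (mul_left_cancel₀ hv (by rw [hEq, hvq]))
            show (arr.getD k 0 == PySem.Int.floordiv M (arr.getD i 0)) =
              (pv arr (i, k) == M)
            rw [Bool.eq_iff_iff]
            simp only [beq_iff_eq]
            exact iff_of_false hk hpvk
        rw [if_neg hv, if_neg (not_not_intro hmod), hdict, List.find?_map]
        cases hfind : ((List.range arr.length).drop (i + 1)).find?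
            ((fun p => pv arr p == M) ∘ (fun j => ((i, j) : Nat × Nat))) with
        | some j =>
          rw [Option.map_some, Option.some_or, Option.map_some, Option.getD_some]
          rfl
        | none =>
          rw [Option.map_none, Option.none_or]
          exact hrec
      · have hnone : ((((List.range arr.length).drop (i + 1)).map (fun j => (i, j))).find?
            (fun p => pv arr p == M)) = none := by
          rw [List.find?_eq_none]
          intro p hp
          obtain ⟨j, hj, rfl⟩ := List.mem_map.1 hp
          intro hcon
          have h0 : arr.getD i 0 * arr.getD j 0 = M := by simpa using hcon
          exact hmod ((PySem.Int.mod_eq_zero_iff_dvd M (arr.getD i 0)).2 ⟨arr.getD j 0, h0.symm⟩)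
        rw [if_neg hv, if_pos hmod, hnone, Option.none_or]
        exact hrec

lemma flatMap_range_last {β : Type} (k : Nat) (f : Nat → List β) (hf : f k = []) :
    (List.range (k + 1)).flatMap f = (List.range k).flatMap f := by
  rw [List.range_succ, List.flatMap_append]
  simp [hf]

lemma pPairs_restrict (n : Nat) (hn : 1 ≤ n) :
    (List.range (n - 1)).flatMap (fun i => (((List.range n).drop (i + 1)).map (fun j => (i, j)))) =
      pPairs n := by
  obtain ⟨k, rfl⟩ : ∃ k, n = k + 1 := ⟨n - 1, by omega⟩
  unfold pPairs
  simp only [Nat.add_sub_cancel]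
  rw [flatMap_range_last k
    (fun i => (((List.range (k + 1)).drop (i + 1)).map (fun j => ((i, j) : Nat × Nat))))
    (by
      show ((List.range (k + 1)).drop (k + 1)).map (fun j => ((k, j) : Nat × Nat)) = []
      rw [List.drop_eq_nil_of_le (by simp)]
      rfl)]

-- among any three integers, some pair has a non-negative product
lemma three_nonneg_pair (a b c : Int) : 0 ≤ a * b ∨ 0 ≤ a * c ∨ 0 ≤ b * c := by
  rcases le_total 0 a with ha | ha <;> rcases le_total 0 b with hb | hb <;>
    rcases le_total 0 c with hc | hc
  · exact Or.inl (mul_nonneg ha hb)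
  · exact Or.inl (mul_nonneg ha hb)
  · exact Or.inr (Or.inl (mul_nonneg ha hc))
  · exact Or.inr (Or.inr (by nlinarith))
  · exact Or.inr (Or.inr (mul_nonneg hb hc))
  · exact Or.inr (Or.inl (by nlinarith))
  · exact Or.inl (by nlinarith)
  · exact Or.inl (by nlinarith)

-- ===== VERDICT (by name: the statement is the Claim_ definition above) =====
theorem max_nPr_pair_spec : Claim_unchanged_max_nPr_pair := by
  intro arr _
  unfold Spec_max_nPr_pair
  intro hD
  rcases arr with _ | ⟨a, _ | ⟨b, rest⟩⟩
  · rfl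
  · rfl
  · set st := rest.foldl bTop ((if b ≤ a then ((a, b) : Int × Int) else (b, a)).1,
      (if b ≤ a then ((a, b) : Int × Int) else (b, a)).2,
      (if b ≤ a then ((a, b) : Int × Int) else (b, a)).2,
      (if b ≤ a then ((a, b) : Int × Int) else (b, a)).1) with hst
    set M := max (st.1 * st.2.1) (st.2.2.1 * st.2.2.2) with hM
    have hInv : PairInv (a :: b :: rest) st := by
      rw [hst]
      have := pairinv_fold rest [a, b] _ (pairinv_init a b)
      simpa using this
    have hB : max_nPr_pair_alt (a :: b :: rest) =
        bFind (a :: b :: rest) (bBuild (a :: b :: rest)) M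
          (List.range ((a :: b :: rest).length - 1)) := by
      rw [hM, hst]
      rfl
    have hA : max_nPr_pair (a :: b :: rest) =
        ((pPairs (a :: b :: rest).length).foldl (aStep (a :: b :: rest)) (-1, [])).2 := rfl
    have hub : ∀ p ∈ pPairs (a :: b :: rest).length, pv (a :: b :: rest) p ≤ M := by
      intro p hp
      obtain ⟨h12, h2n⟩ := (mem_pPairs _ p).1 hp
      obtain ⟨r, hr⟩ := submultiset_of_pair (a :: b :: rest) p.1 p.2 h12 h2n
      exact pair_bound (a :: b :: rest) st hInv _ _ r hr
    have hach : ∃ p ∈ pPairs (a :: b :: rest).length, pv (a :: b :: rest) p = M := by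
      rcases max_choice (st.1 * st.2.1) (st.2.2.1 * st.2.2.2) with hc | hc
      · obtain ⟨mt, hmt, _, _⟩ := hInv.1
        obtain ⟨i, j, hij, hjl, hprod⟩ := exists_pair_of_cons_cons (a :: b :: rest) _ _ mt hmt
        refine ⟨(i, j), (mem_pPairs _ _).2 ⟨hij, hjl⟩, ?_⟩
        show (a :: b :: rest).getD i 0 * (a :: b :: rest).getD j 0 = M
        rw [hprod, ← hc]
      · obtain ⟨mb, hmb, _, _⟩ := hInv.2
        obtain ⟨i, j, hij, hjl, hprod⟩ := exists_pair_of_cons_cons (a :: b :: rest) _ _ mb hmb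
        refine ⟨(i, j), (mem_pPairs _ _).2 ⟨hij, hjl⟩, ?_⟩
        show (a :: b :: rest).getD i 0 * (a :: b :: rest).getD j 0 = M
        rw [hprod, ← hc]
    -- since arr is outside D_, some pair has non-negative product, so M ≥ 0
    have hM0 : (0 : Int) ≤ M := by
      rcases rest with _ | ⟨c, rest'⟩
      · have hab : (0 : Int) ≤ a * b := by
          by_contra hc
          exact hD ⟨rfl, by
            show (a : Int) * b ≤ -1
            omega⟩
        have h01 : ((0, 1) : Nat × Nat) ∈ pPairs ([a, b] : List Int).length :=
          (mem_pPairs _ _).2 ⟨by omega, by simp⟩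
        have := hub (0, 1) h01
        have hpv : pv [a, b] (0, 1) = a * b := rfl
        rw [hpv] at this
        omega
      · have h3 := three_nonneg_pair a b c
        have hlen : 3 ≤ (a :: b :: c :: rest').length := by simp [List.length_cons]
        rcases h3 with h | h | h
        · have hmem : ((0, 1) : Nat × Nat) ∈ pPairs (a :: b :: c :: rest').length :=
            (mem_pPairs _ _).2 ⟨by omega, by omega⟩
          have := hub (0, 1) hmem
          have hpv : pv (a :: b :: c :: rest') (0, 1) = a * b := rfl
          rw [hpv] at this
          omega
        · have hmem : ((0, 2) : Nat × Nat) ∈ pPairs (a :: b :: c :: rest').length :=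
            (mem_pPairs _ _).2 ⟨by omega, by omega⟩
          have := hub (0, 2) hmem
          have hpv : pv (a :: b :: c :: rest') (0, 2) = a * c := rfl
          rw [hpv] at this
          omega
        · have hmem : ((1, 2) : Nat × Nat) ∈ pPairs (a :: b :: c :: rest').length :=
            (mem_pPairs _ _).2 ⟨by omega, by omega⟩
          have := hub (1, 2) hmem
          have hpv : pv (a :: b :: c :: rest') (1, 2) = b * c := rfl
          rw [hpv] at this
          omega
    rw [hA, foldA_char]
    have hMsM : runMax (a :: b :: rest) (-1) (pPairs (a :: b :: rest).length) = M := by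
      apply le_antisymm
      · exact runMax_le (a :: b :: rest) (-1) M _ (by omega) hub
      · obtain ⟨p, hp, hpv⟩ := hach
        rw [← hpv]
        exact pv_le_runMax (a :: b :: rest) _ _ p hp
    obtain ⟨p₀, hp₀⟩ := runMax_find_some (a :: b :: rest) (-1) (pPairs (a :: b :: rest).length)
      (by rw [hMsM]; omega)
    have hpv₀ : pv (a :: b :: rest) p₀ =
        runMax (a :: b :: rest) (-1) (pPairs (a :: b :: rest).length) := by
      simpa using List.find?_some hp₀
    have hgt : (-1 : Int) < pv (a :: b :: rest) p₀ := by rw [hpv₀, hMsM]; omega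
    rw [hp₀, Option.map_some, Option.getD_some, if_pos hgt]
    rw [hB]
    rw [bFind_char (a :: b :: rest) M hM0 (List.range ((a :: b :: rest).length - 1))
      (fun i hi => by
        have := List.mem_range.1 hi
        simp only [List.length_cons] at this ⊢
        omega)]
    rw [pPairs_restrict _ (by simp)]
    have hp₀' := hp₀
    rw [hMsM] at hp₀'
    rw [hp₀', Option.map_some, Option.getD_some]

theorem max_nPr_pair_changed : Claim_changed_max_nPr_pair := by
  unfold Claim_changed_max_nPr_pair; decide

theorem max_nPr_pair_tight : Claim_exact_max_nPr_pair := by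
  intro arr _ hD
  obtain ⟨hlen, hprod⟩ := hD
  rcases arr with _ | ⟨a, _ | ⟨b, rest⟩⟩
  · simp at hlen
  · simp at hlen
  · have hrest : rest = [] := by
      simp [List.length_cons] at hlen
      exact hlen
    subst hrest
    have hab : a * b ≤ -1 := by simpa using hprod
    have hane : a ≠ 0 := by
      intro h
      rw [h, zero_mul] at hab
      omega
    have habne : a ≠ b := by
      intro h
      rw [h] at hab
      nlinarith [sq_nonneg b]
    -- A returns []: the only pair's product a*b never beats the initial -1
    have hA : max_nPr_pair [a, b] = [] := by
      show (((List.range 2).flatMap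
          (fun i => ((List.range 2).drop (i + 1)).map (fun j => (i, j)))).foldl
          (aStep [a, b]) (-1, [])).2 = []
      have hps : ((List.range 2).flatMap
          (fun i => ((List.range 2).drop (i + 1)).map (fun j => (i, j)))) =
          [((0 : Nat), (1 : Nat))] := by decide
      rw [hps]
      show (aStep [a, b] (-1, []) (0, 1)).2 = []
      show ((if (-1 : Int) < ([a,b].getD 0 0 * [a,b].getD 1 0) then
        ([a,b].getD 0 0 * [a,b].getD 1 0, [[a,b].getD 0 0, [a,b].getD 1 0]) else ((-1 : Int), ([] : List Int)))).2 = []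
      rw [if_neg (by
        show ¬ (-1 : Int) < a * b
        omega)]
    -- B returns [a, b]
    have hM : max ((if b ≤ a then ((a, b) : Int × Int) else (b, a)).1 *
        (if b ≤ a then ((a, b) : Int × Int) else (b, a)).2)
        ((if b ≤ a then ((a, b) : Int × Int) else (b, a)).2 *
        (if b ≤ a then ((a, b) : Int × Int) else (b, a)).1) = a * b := by
      by_cases h : b ≤ a
      · simp only [if_pos h]
        simp [mul_comm]
      · simp only [if_neg h]
        simp [mul_comm]
    have hB : max_nPr_pair_alt [a, b] = [a, b] := by
      show bFind [a, b] (bBuild [a, b])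
        (max ((if b ≤ a then ((a, b) : Int × Int) else (b, a)).1 *
          (if b ≤ a then ((a, b) : Int × Int) else (b, a)).2)
         ((if b ≤ a then ((a, b) : Int × Int) else (b, a)).2 *
          (if b ≤ a then ((a, b) : Int × Int) else (b, a)).1))
        (List.range (([a, b] : List Int).length - 1)) = [a, b]
      rw [hM]
      have hrange : List.range (([a, b] : List Int).length - 1) = [0] := rfl
      rw [hrange]
      have hv : ([a, b] : List Int).getD 0 0 = a := rfl
      have hmod : PySem.Int.mod (a * b) a = 0 :=
        (PySem.Int.mod_eq_zero_iff_dvd (a * b) a).2 ⟨b, rfl⟩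
      have hfd : PySem.Int.floordiv (a * b) a = b := by
        have h0 := PySem.Int.floordiv_mul_add_mod (a * b) a
        rw [hmod, add_zero] at h0
        have : a * PySem.Int.floordiv (a * b) a = a * b := by rw [mul_comm]; exact h0
        exact mul_left_cancel₀ hane this
      have hdict : (bBuild [a, b]).getD b [] = [1] := by
        rw [bBuild_getD]
        have : ([a, b] : List Int).length = 2 := rfl
        rw [this]
        have hr2 : List.range 2 = [0, 1] := by decide
        rw [hr2]
        have hab' : (a == b) = false := beq_eq_false_iff_ne.mpr habne
        simp [List.filter, hab']
      show (if ([a, b] : List Int).getD 0 0 = 0 then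
          if a * b = 0 then [0, ([a, b] : List Int).getD 1 0] else bFind [a, b] (bBuild [a, b]) (a * b) []
        else if PySem.Int.mod (a * b) (([a, b] : List Int).getD 0 0) ≠ 0 then
          bFind [a, b] (bBuild [a, b]) (a * b) []
        else
          match ((bBuild [a, b]).getD (PySem.Int.floordiv (a * b) (([a, b] : List Int).getD 0 0)) []).find?
              (fun j => decide (0 < j)) with
          | some j => [([a, b] : List Int).getD 0 0, ([a, b] : List Int).getD j 0]
          | none => bFind [a, b] (bBuild [a, b]) (a * b) []) = [a, b]
      rw [hv, if_neg hane, hmod, hfd, hdict]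
      simp
    rw [hA, hB]
    intro h
    exact (List.cons_ne_nil a [b]) h.symm
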